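-- pv_equiv track=rewrite | github.com/MdAbedin/binarysearch | 0501 - 0600/0528 Group Points.py | solve
-- ===== SOURCE A (Python) =====
-- def solve(points, k):
--     parents = list(range(len(points)))
--
--     def find(x):
--         if x == parents[x]: return x;
--         parents[x] = find(parents[x])
--         return parents[x]
--
--     def union(a,b):
--         a,b = find(a), find(b)
--         if a != b: parents[b] = a
--
--     def dist_sq(x1,y1,x2,y2): return (x2-x1)**2 + (y2-y1)**2
--
--     for i in range(len(points)):
--         for j in range(i):
--             if dist_sq(*points[i], *points[j]) <= k**2:
--                 union(i,j)
--
--     return len(set(find(x) for x in range(len(points))))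
-- ===== SOURCE B (Python) =====
-- def solve(points, k):
--     # Merge-by-relabeling: keep a flat component label per point (no parent
--     # tree, no recursion); when two labels must join, rewrite one label to the
--     # other everywhere, and finally count the distinct labels.
--     n = len(points)
--     labels = list(range(n))
--     kk = k * k
--     for i in range(n):
--         xi, yi = points[i]
--         for j in range(i):
--             xj, yj = points[j]
--             if (xi - xj) ** 2 + (yi - yj) ** 2 <= kk:
--                 lo, li = labels[j], labels[i]
--                 if lo != li:
--                     labels = [li if l == lo else l for l in labels]
--     return len(set(labels))
-- ===== Notes on version B (the rewrite author's own statement) =====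
-- stated objective: alternative
-- what changed: A builds a union-find parent forest with recursive path-compressing find and a final find-per-node pass; B keeps a flat component-label list, merges two components by rewriting one label into the other across the list, and returns the number of distinct labels.
import Mathlib
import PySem

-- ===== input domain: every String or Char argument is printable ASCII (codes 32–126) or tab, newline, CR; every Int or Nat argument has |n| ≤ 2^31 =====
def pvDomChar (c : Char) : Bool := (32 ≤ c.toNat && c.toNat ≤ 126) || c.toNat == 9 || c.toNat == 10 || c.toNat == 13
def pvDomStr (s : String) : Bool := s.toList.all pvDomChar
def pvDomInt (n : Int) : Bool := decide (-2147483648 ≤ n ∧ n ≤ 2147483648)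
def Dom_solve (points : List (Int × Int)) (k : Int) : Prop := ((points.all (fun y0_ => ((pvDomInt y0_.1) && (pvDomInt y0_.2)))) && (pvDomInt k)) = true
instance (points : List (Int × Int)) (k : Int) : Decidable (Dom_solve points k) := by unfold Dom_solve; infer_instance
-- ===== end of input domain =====

-- B replaces A's recursive union-find (parent array, path compression) by flat component
-- labels merged by rewriting one label into the other; same return value, no speed claim.

-- ===== PORT A =====
-- parents[x] lookup (x is always in range when the Python runs; default is irrelevant there)
def pvP (p : List Nat) (x : Nat) : Nat := p.getD x x

-- find(x) with path compression; fuel bounds the recursion depth (the chain to the root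
-- is proved shorter than the fuel len(points) wherever A's loops call it)
def pvFind : Nat → List Nat → Nat → List Nat × Nat
  | 0, p, x => (p, x)
  | f+1, p, x =>
    if pvP p x = x then (p, x)
    else
      let q := pvFind f p (pvP p x)
      (q.1.set x q.2, q.2)

def pvUnion (f : Nat) (p : List Nat) (a b : Nat) : List Nat :=
  let q1 := pvFind f p a
  let q2 := pvFind f q1.1 b
  if q1.2 ≠ q2.2 then q2.1.set q2.2 q1.2 else q2.1

def pvDistSq (a b : Int × Int) : Int := (b.1 - a.1)^2 + (b.2 - a.2)^2

def solve (points : List (Int × Int)) (k : Int) : Int :=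
  let n := points.length
  let p1 := (List.range n).foldl (fun p i =>
    (List.range i).foldl (fun p j =>
      if pvDistSq (points.getD i (0,0)) (points.getD j (0,0)) ≤ k^2 then pvUnion n p i j
      else p) p) (List.range n)
  let fin := (List.range n).foldl (fun st x =>
      let q := pvFind n st.1 x
      (q.1, PySem.Set.add st.2 q.2)) (p1, PySem.Set.ofList ([] : List Nat))
  PySem.Set.len fin.2

-- ===== PORT B =====
def solve_alt (points : List (Int × Int)) (k : Int) : Int :=
  let n := points.length
  let kk := k * k
  let labs := (List.range n).foldl (fun labels i =>
    let xi := (points.getD i (0,0)).1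
    let yi := (points.getD i (0,0)).2
    (List.range i).foldl (fun labels j =>
      let xj := (points.getD j (0,0)).1
      let yj := (points.getD j (0,0)).2
      if (xi - xj)^2 + (yi - yj)^2 ≤ kk then
        let lo := labels.getD j 0
        let li := labels.getD i 0
        if lo ≠ li then labels.map (fun l => if l = lo then li else l) else labels
      else labels) labels) (List.range n)
  PySem.Set.len (PySem.Set.ofList labs)

-- ===== PRECONDITION & SPEC =====
def Spec_solve (points : List (Int × Int)) (k : Int) (out : Int) : Prop := out = solve_alt points k
instance (points : List (Int × Int)) (k : Int) (out : Int) : Decidable (Spec_solve points k out) := by unfold Spec_solve; infer_instance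

-- ===== CLAIM (what is proved, stated in full; the proofs are below) =====
def Claim_equal_solve : Prop := ∀ (points : List (Int × Int)) (k : Int), Dom_solve points k → Spec_solve points k (solve points k)

-- ===== LEMMAS AND PROOFS =====

-- parent-pointer iteration, roots, and the acyclicity invariant of A's parent array
def pvIter (p : List Nat) : Nat → Nat → Nat
  | 0, x => x
  | d+1, x => pvIter p d (pvP p x)

def pvRank (p : List Nat) (m : Nat → Nat) : Prop :=
  ∀ x, x < p.length → pvP p x ≠ x → m (pvP p x) < m x

def pvGood (p : List Nat) : Prop :=
  (∀ x, x < p.length → pvP p x < p.length) ∧ ∃ m, pvRank p m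

def pvRt (p : List Nat) (x r : Nat) : Prop := (∃ d, pvIter p d x = r) ∧ pvP p r = r

def pvRoot (p : List Nat) (x : Nat) : Nat := pvIter p p.length x

theorem pvP_set (p : List Nat) (x r y : Nat) :
    pvP (p.set x r) y = if y = x ∧ x < p.length then r else pvP p y := by
  simp only [pvP, List.getD_eq_getElem?_getD, List.getElem?_set]
  split_ifs with h1 h2 h3 h4 <;> simp_all

theorem pvIter_add (p : List Nat) (c d x : Nat) :
    pvIter p (c + d) x = pvIter p d (pvIter p c x) := by
  induction c generalizing x with
  | zero => simp [pvIter]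
  | succ c ih =>
      have : c + 1 + d = (c + d) + 1 := by omega
      rw [this]
      simp only [pvIter]
      exact ih (pvP p x)

theorem pvIter_fix (p : List Nat) {r : Nat} (h : pvP p r = r) (d : Nat) :
    pvIter p d r = r := by
  induction d with
  | zero => rfl
  | succ d ih => simp only [pvIter, h]; exact ih

theorem pvIter_succ_right (p : List Nat) (d x : Nat) :
    pvIter p (d + 1) x = pvP p (pvIter p d x) := by
  have := pvIter_add p d 1 x
  simpa [pvIter] using this

theorem pvIter_lt {p : List Nat} (hr : ∀ z, z < p.length → pvP p z < p.length)
    {x : Nat} (hx : x < p.length) (d : Nat) : pvIter p d x < p.length := by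
  induction d generalizing x with
  | zero => exact hx
  | succ d ih => exact ih (hr x hx)

theorem pvIter_ge_fix {p : List Nat} {d e x r : Nat} (hd : pvIter p d x = r)
    (hfix : pvP p r = r) (hde : d ≤ e) : pvIter p e x = r := by
  have : e = d + (e - d) := by omega
  rw [this, pvIter_add, hd, pvIter_fix p hfix]

theorem pvRt_unique {p : List Nat} {x r r' : Nat} (h : pvRt p x r) (h' : pvRt p x r') :
    r = r' := by
  obtain ⟨⟨d, hd⟩, hfix⟩ := h
  obtain ⟨⟨d', hd'⟩, hfix'⟩ := h'
  rcases le_total d d' with hle | hle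
  · rw [← hd', pvIter_ge_fix hd hfix hle]
  · rw [← hd, pvIter_ge_fix hd' hfix' hle]

theorem pvRt_parent {p : List Nat} {x r : Nat} (h : pvRt p (pvP p x) r) : pvRt p x r := by
  obtain ⟨⟨d, hd⟩, hfix⟩ := h
  exact ⟨⟨d + 1, hd⟩, hfix⟩

theorem pvRt_of_fix {p : List Nat} {x : Nat} (h : pvP p x = x) : pvRt p x x :=
  ⟨⟨0, rfl⟩, h⟩

theorem pvRt_trans {p : List Nat} {x y r e : Nat} (h : pvIter p e x = y)
    (h' : pvRt p y r) : pvRt p x r := by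
  obtain ⟨⟨d, hd⟩, hfix⟩ := h'
  exact ⟨⟨e + d, by rw [pvIter_add, h, hd]⟩, hfix⟩

theorem pvReach {p : List Nat} (hG : pvGood p) {x : Nat} (hx : x < p.length) :
    ∃ d, d < p.length ∧ pvP p (pvIter p d x) = pvIter p d x := by
  obtain ⟨hr, m, hm⟩ := hG
  by_contra h
  simp only [not_exists, not_and] at h
  have hmono : ∀ d, d < p.length → m (pvIter p (d + 1) x) < m (pvIter p d x) := by
    intro d hd
    rw [pvIter_succ_right]
    exact hm _ (pvIter_lt hr hx d) (h d hd)
  have hchain : ∀ k e, 0 < k → e + k ≤ p.length →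
      m (pvIter p (e + k) x) < m (pvIter p e x) := by
    intro k
    induction k with
    | zero => omega
    | succ k ih =>
        intro e hk he
        rcases Nat.eq_zero_or_pos k with hk0 | hk0
        · subst hk0; exact hmono e (by omega)
        · have h1 : m (pvIter p (e + k + 1) x) < m (pvIter p (e + k) x) :=
            hmono (e + k) (by omega)
          have h2 := ih e hk0 (by omega)
          calc m (pvIter p (e + (k + 1)) x) = m (pvIter p (e + k + 1) x) := by ring_nf
            _ < m (pvIter p (e + k) x) := h1
            _ < m (pvIter p e x) := h2
  have hinj : Set.InjOn (fun d => pvIter p d x) (Finset.range (p.length + 1)) := by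
    intro d hd e he hde
    simp only [Finset.coe_range, Set.mem_Iio] at hd he
    by_contra hne
    have hde' : pvIter p d x = pvIter p e x := hde
    rcases Nat.lt_or_ge d e with hlt | hge
    · have hlt2 := hchain (e - d) d (by omega) (by omega)
      rw [show d + (e - d) = e by omega, ← hde'] at hlt2
      exact lt_irrefl _ hlt2
    · have hlt : e < d := by omega
      have hlt2 := hchain (d - e) e (by omega) (by omega)
      rw [show e + (d - e) = d by omega, hde'] at hlt2
      exact lt_irrefl _ hlt2
  have hmaps : ∀ d ∈ Finset.range (p.length + 1), pvIter p d x ∈ Finset.range p.length := by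
    intro d _
    simpa using pvIter_lt hr hx d
  have := Finset.card_le_card_of_injOn _ hmaps hinj
  simp at this

theorem pvRt_root {p : List Nat} (hG : pvGood p) {x : Nat} (hx : x < p.length) :
    pvRt p x (pvRoot p x) := by
  obtain ⟨d, hd, hfix⟩ := pvReach hG hx
  have hroot : pvIter p p.length x = pvIter p d x := pvIter_ge_fix rfl hfix (by omega)
  refine ⟨⟨d, ?_⟩, ?_⟩
  · show pvIter p d x = pvIter p p.length x
    exact hroot.symm
  · show pvP p (pvIter p p.length x) = pvIter p p.length x
    rw [hroot]
    exact hfix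

theorem pvRoot_eq {p : List Nat} (hG : pvGood p) {x r : Nat} (hx : x < p.length)
    (h : pvRt p x r) : pvRoot p x = r :=
  pvRt_unique (pvRt_root hG hx) h

theorem pvRoot_lt {p : List Nat} (hG : pvGood p) {x : Nat} (hx : x < p.length) :
    pvRoot p x < p.length :=
  pvIter_lt hG.1 hx p.length

theorem pvRoot_parent {p : List Nat} (hG : pvGood p) {x : Nat} (hx : x < p.length) :
    pvRoot p x = pvRoot p (pvP p x) := by
  have hy : pvP p x < p.length := hG.1 x hx
  exact pvRoot_eq hG hx (pvRt_parent (pvRt_root hG hy))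

theorem pvRoot_of_fix {p : List Nat} (hG : pvGood p) {x : Nat} (hx : x < p.length)
    (h : pvP p x = x) : pvRoot p x = x :=
  pvRoot_eq hG hx (pvRt_of_fix h)

theorem pv_m_root_lt {p : List Nat} {m : Nat → Nat} (hm : pvRank p m)
    (hr : ∀ z, z < p.length → pvP p z < p.length) {x r : Nat} (hx : x < p.length)
    (h : pvRt p x r) (hne : r ≠ x) : m r < m x := by
  obtain ⟨⟨d, hd⟩, hfix⟩ := h
  have aux : ∀ d x, x < p.length → pvIter p d x = r → r ≠ x → m r < m x := by
    intro d
    induction d with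
    | zero =>
        intro x hx hd hne
        simp only [pvIter] at hd
        exact absurd hd.symm hne
    | succ d ih =>
        intro x hx hd hne
        simp only [pvIter] at hd
        by_cases hxx : pvP p x = x
        · rw [hxx, pvIter_fix p hxx] at hd
          exact absurd hd.symm hne
        · have hy := hr x hx
          have hstep := hm x hx hxx
          by_cases hyr : r = pvP p x
          · rw [hyr]; exact hstep
          · exact lt_trans (ih (pvP p x) hy hd hyr) hstep
  exact aux d x hx hd hne

-- compression step: setting p[x] := root(x) preserves the reaches-root relation and goodness
theorem pvSet_Rt_mpr {p : List Nat} {x r : Nat} (hRt : pvRt p x r)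
    {y r0 : Nat} (h : pvRt p y r0) : pvRt (p.set x r) y r0 := by
  obtain ⟨⟨d, hd⟩, hfix⟩ := h
  have hfix' : pvP (p.set x r) r0 = r0 := by
    rw [pvP_set]
    split_ifs with hc
    · obtain ⟨hr0x, _⟩ := hc
      subst hr0x
      exact pvRt_unique hRt (pvRt_of_fix hfix)
    · exact hfix
  have aux : ∀ d y, pvIter p d y = r0 → pvRt (p.set x r) y r0 := by
    intro d
    induction d with
    | zero =>
        intro y hy
        simp only [pvIter] at hy
        exact ⟨⟨0, hy⟩, hfix'⟩
    | succ d ih =>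
        intro y hd2
        by_cases hcx : y = x ∧ x < p.length
        · have hpx : pvRt p y r0 := ⟨⟨d + 1, hd2⟩, hfix⟩
          obtain ⟨hyx, hxl⟩ := hcx
          subst hyx
          have hrr0 : r = r0 := pvRt_unique hRt hpx
          refine ⟨⟨1, ?_⟩, hfix'⟩
          show pvIter (p.set y r) 1 y = r0
          simp only [pvIter, pvP_set]
          simp [hxl, ← hrr0]
        · simp only [pvIter] at hd2
          have hstep : pvP (p.set x r) y = pvP p y := by rw [pvP_set, if_neg hcx]
          have h1 := ih (pvP p y) hd2
          exact pvRt_parent (show pvRt _ (pvP (p.set x r) y) r0 by rw [hstep]; exact h1)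
  exact aux d y hd

theorem pvSet_Rt_mp {p : List Nat} {x r : Nat} (hRt : pvRt p x r)
    {y r0 : Nat} (h : pvRt (p.set x r) y r0) : pvRt p y r0 := by
  obtain ⟨⟨d, hd⟩, hfixq⟩ := h
  have hfix0 : pvP p r0 = r0 := by
    by_cases hc : r0 = x ∧ x < p.length
    · rw [pvP_set, if_pos hc] at hfixq
      have h2 := hRt.2
      rw [hfixq] at h2
      exact h2
    · rw [pvP_set, if_neg hc] at hfixq
      exact hfixq
  have aux : ∀ d y, pvIter (p.set x r) d y = r0 → pvRt p y r0 := by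
    intro d
    induction d with
    | zero =>
        intro y hy
        simp only [pvIter] at hy
        exact ⟨⟨0, hy⟩, hfix0⟩
    | succ d ih =>
        intro y hd2
        simp only [pvIter] at hd2
        by_cases hcx : y = x ∧ x < p.length
        · have hq : pvP (p.set x r) y = r := by rw [pvP_set, if_pos hcx]
          rw [hq] at hd2
          have h1 : pvRt p r r0 := ih r hd2
          obtain ⟨e, he⟩ := hRt.1
          obtain ⟨hyx, _⟩ := hcx
          subst hyx
          exact pvRt_trans he h1
        · have hstep : pvP (p.set x r) y = pvP p y := by rw [pvP_set, if_neg hcx]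
          rw [hstep] at hd2
          exact pvRt_parent (ih _ hd2)
  exact aux d y hd

theorem pvSet_good {p : List Nat} (hG : pvGood p) {x r : Nat} (hx : x < p.length)
    (hRt : pvRt p x r) : pvGood (p.set x r) := by
  obtain ⟨hr, m, hm⟩ := hG
  have hrlt : r < p.length := by
    obtain ⟨⟨d, hd⟩, _⟩ := hRt
    rw [← hd]
    exact pvIter_lt hr hx d
  constructor
  · intro z hz
    rw [List.length_set] at hz ⊢
    rw [pvP_set]
    split_ifs with hc
    · exact hrlt
    · exact hr z hz
  · refine ⟨m, ?_⟩
    intro z hz hnz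
    rw [List.length_set] at hz
    rw [pvP_set] at hnz ⊢
    by_cases hc : z = x ∧ x < p.length
    · rw [if_pos hc] at hnz ⊢
      obtain ⟨hzx, _⟩ := hc
      subst hzx
      exact pv_m_root_lt hm hr hz hRt hnz
    · rw [if_neg hc] at hnz ⊢
      exact hm z hz hnz

-- find specification: returns the root and preserves length, goodness and the reach relation
theorem pvFind_spec : ∀ (f d : Nat) (p : List Nat) (x : Nat), pvGood p → x < p.length →
    pvP p (pvIter p d x) = pvIter p d x → d < f →
    (pvFind f p x).2 = pvRoot p x ∧ (pvFind f p x).1.length = p.length ∧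
      pvGood (pvFind f p x).1 ∧ (∀ y r0, pvRt (pvFind f p x).1 y r0 ↔ pvRt p y r0) := by
  intro f
  induction f with
  | zero => intro d p x _ _ _ h; omega
  | succ f ih =>
      intro d p x hG hx hfix hdf
      by_cases hxx : pvP p x = x
      · have hres : pvFind (f+1) p x = (p, x) := by
          simp only [pvFind, if_pos hxx]
        rw [hres]
        exact ⟨(pvRoot_of_fix hG hx hxx).symm, rfl, hG, fun _ _ => Iff.rfl⟩
      · have hres : pvFind (f+1) p x =
            ((pvFind f p (pvP p x)).1.set x (pvFind f p (pvP p x)).2,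
              (pvFind f p (pvP p x)).2) := by
          simp only [pvFind, if_neg hxx]
        rw [hres]
        dsimp only
        obtain ⟨e, rfl⟩ : ∃ e, d = e + 1 := by
          cases d with
          | zero => exact absurd hfix (by simpa [pvIter] using hxx)
          | succ e => exact ⟨e, rfl⟩
        have hy : pvP p x < p.length := hG.1 x hx
        have hfixe : pvP p (pvIter p e (pvP p x)) = pvIter p e (pvP p x) := by
          simpa [pvIter] using hfix
        obtain ⟨hq2, hqlen, hqG, hqiff⟩ := ih e p (pvP p x) hG hy hfixe (by omega)
        have hroot : pvRoot p (pvP p x) = pvRoot p x := (pvRoot_parent hG hx).symm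
        have hxq : x < (pvFind f p (pvP p x)).1.length := by rw [hqlen]; exact hx
        have hq2' : (pvFind f p (pvP p x)).2 = pvRoot p x := by rw [hq2, hroot]
        have hRtq : pvRt (pvFind f p (pvP p x)).1 x ((pvFind f p (pvP p x)).2) := by
          rw [hq2']
          exact (hqiff x _).mpr (pvRt_root hG hx)
        refine ⟨hq2', ?_, ?_, ?_⟩
        · rw [List.length_set, hqlen]
        · exact pvSet_good hqG hxq hRtq
        · intro y r0
          constructor
          · intro h; exact (hqiff y r0).mp (pvSet_Rt_mp hRtq h)
          · intro h; exact pvSet_Rt_mpr hRtq ((hqiff y r0).mpr h)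

theorem pvFind_full {p : List Nat} (hG : pvGood p) {x : Nat} (hx : x < p.length) :
    (pvFind p.length p x).2 = pvRoot p x ∧ (pvFind p.length p x).1.length = p.length ∧
      pvGood (pvFind p.length p x).1 ∧
      (∀ y r0, pvRt (pvFind p.length p x).1 y r0 ↔ pvRt p y r0) := by
  obtain ⟨d, hd, hfix⟩ := pvReach hG hx
  exact pvFind_spec p.length d p x hG hx hfix hd

-- linking two distinct roots rb -> ra
theorem pvLink_Rt_b {q : List Nat} {ra rb : Nat} (hfa : pvP q ra = ra) (hne : ra ≠ rb)
    (hrb : rb < q.length) : ∀ d y, pvIter q d y = rb → pvRt (q.set rb ra) y ra := by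
  have hfix' : pvP (q.set rb ra) ra = ra := by
    rw [pvP_set, if_neg]
    · exact hfa
    · rintro ⟨h1, _⟩; exact hne h1
  have hbase : pvRt (q.set rb ra) rb ra := by
    refine ⟨⟨1, ?_⟩, hfix'⟩
    show pvIter (q.set rb ra) 1 rb = ra
    simp only [pvIter, pvP_set]
    simp [hrb]
  intro d
  induction d with
  | zero =>
      intro y hy
      simp only [pvIter] at hy
      subst hy
      exact hbase
  | succ d ih =>
      intro y hy
      simp only [pvIter] at hy
      by_cases hyb : y = rb
      · subst hyb
        exact hbase
      · have hstep : pvP (q.set rb ra) y = pvP q y := by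
          rw [pvP_set, if_neg]
          rintro ⟨h1, _⟩; exact hyb h1
        exact pvRt_parent (show pvRt _ (pvP (q.set rb ra) y) ra by rw [hstep]; exact ih _ hy)

theorem pvLink_Rt_other {q : List Nat} {ra rb : Nat} (hfb : pvP q rb = rb)
    {y r0 : Nat} (h : pvRt q y r0) (hr0 : r0 ≠ rb) : pvRt (q.set rb ra) y r0 := by
  obtain ⟨⟨d, hd⟩, hfix⟩ := h
  have hfix' : pvP (q.set rb ra) r0 = r0 := by
    rw [pvP_set, if_neg]
    · exact hfix
    · rintro ⟨h1, _⟩; exact hr0 h1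
  have aux : ∀ d y, pvIter q d y = r0 → pvRt (q.set rb ra) y r0 := by
    intro d
    induction d with
    | zero =>
        intro y hy
        simp only [pvIter] at hy
        exact ⟨⟨0, hy⟩, hfix'⟩
    | succ d ih =>
        intro y hy
        simp only [pvIter] at hy
        by_cases hyb : y = rb
        · subst hyb
          rw [hfb, pvIter_fix q hfb] at hy
          exact absurd hy.symm hr0
        · have hstep : pvP (q.set rb ra) y = pvP q y := by
            rw [pvP_set, if_neg]
            rintro ⟨h1, _⟩; exact hyb h1
          exact pvRt_parent (show pvRt _ (pvP (q.set rb ra) y) r0 by rw [hstep]; exact ih _ hy)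
  exact aux d y hd

theorem pvLink_good {q : List Nat} (hG : pvGood q) {ra rb : Nat} (hfa : pvP q ra = ra)
    (hfb : pvP q rb = rb) (hne : ra ≠ rb) (hra : ra < q.length) (hrb : rb < q.length) :
    pvGood (q.set rb ra) := by
  obtain ⟨hr, m, hm⟩ := hG
  have hGq : pvGood q := ⟨hr, m, hm⟩
  have hrootb : pvRoot q rb = rb := pvRoot_of_fix hGq hrb hfb
  have hroota : pvRoot q ra = ra := pvRoot_of_fix hGq hra hfa
  refine ⟨?_, ?_⟩
  · intro z hz
    rw [List.length_set] at hz ⊢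
    rw [pvP_set]
    split_ifs with hc
    · exact hra
    · exact hr z hz
  · refine ⟨fun z => if pvRoot q z = rb then m z + (m ra + 1) else m z, ?_⟩
    intro z hz hnz
    rw [List.length_set] at hz
    by_cases hc : z = rb ∧ rb < q.length
    · rw [pvP_set, if_pos hc] at hnz ⊢
      obtain ⟨hzb, _⟩ := hc
      subst hzb
      dsimp only
      rw [hroota, hrootb, if_neg hne, if_pos rfl]
      omega
    · rw [pvP_set, if_neg hc] at hnz ⊢
      have hzb : z ≠ rb := fun h => hc ⟨h, hrb⟩
      have hrp : pvRoot q (pvP q z) = pvRoot q z := (pvRoot_parent hGq hz).symm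
      have hstep := hm z hz hnz
      dsimp only
      rw [hrp]
      split_ifs with h2
      · omega
      · exact hstep

def pvSub (a b v : Nat) : Nat := if v = b then a else v

theorem pvUnion_spec {p : List Nat} (hG : pvGood p) {a b : Nat} (ha : a < p.length)
    (hb : b < p.length) :
    (pvUnion p.length p a b).length = p.length ∧ pvGood (pvUnion p.length p a b) ∧
    ∀ y, y < p.length → pvRoot (pvUnion p.length p a b) y =
      pvSub (pvRoot p a) (pvRoot p b) (pvRoot p y) := by
  obtain ⟨h1a, hl1, hG1, hiff1⟩ := pvFind_full hG ha
  have hb1 : b < (pvFind p.length p a).1.length := by rw [hl1]; exact hb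
  have hfull2 := pvFind_full hG1 hb1
  rw [hl1] at hfull2
  obtain ⟨h2b, hl2, hG2, hiff2⟩ := hfull2
  have hrootb1 : pvRoot (pvFind p.length p a).1 b = pvRoot p b :=
    pvRoot_eq hG1 hb1 ((hiff1 b _).mpr (pvRt_root hG hb))
  have h2b' : (pvFind p.length (pvFind p.length p a).1 b).2 = pvRoot p b := by
    rw [h2b, hrootb1]
  have hl2' : (pvFind p.length (pvFind p.length p a).1 b).1.length = p.length := hl2
  have hiff12 : ∀ y r0, pvRt (pvFind p.length (pvFind p.length p a).1 b).1 y r0 ↔ pvRt p y r0 :=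
    fun y r0 => (hiff2 y r0).trans (hiff1 y r0)
  have hU : pvUnion p.length p a b =
      (if (pvFind p.length p a).2 ≠ (pvFind p.length (pvFind p.length p a).1 b).2 then
        (pvFind p.length (pvFind p.length p a).1 b).1.set
          (pvFind p.length (pvFind p.length p a).1 b).2 (pvFind p.length p a).2
      else (pvFind p.length (pvFind p.length p a).1 b).1) := rfl
  by_cases hrr : pvRoot p a = pvRoot p b
  · have heq : ¬ ((pvFind p.length p a).2 ≠ (pvFind p.length (pvFind p.length p a).1 b).2) := by
      rw [h1a, h2b']
      simpa using hrr
    rw [hU, if_neg heq]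
    refine ⟨hl2', hG2, ?_⟩
    intro y hy
    have hro : pvRoot (pvFind p.length (pvFind p.length p a).1 b).1 y = pvRoot p y :=
      pvRoot_eq hG2 (by rw [hl2']; exact hy) ((hiff12 y _).mpr (pvRt_root hG hy))
    rw [hro]
    unfold pvSub
    split_ifs with h
    · rw [h, ← hrr]
    · rfl
  · have hne2 : (pvFind p.length p a).2 ≠ (pvFind p.length (pvFind p.length p a).1 b).2 := by
      rw [h1a, h2b']
      exact hrr
    rw [hU, if_pos hne2, h1a, h2b']
    have hfa2 : pvP (pvFind p.length (pvFind p.length p a).1 b).1 (pvRoot p a) = pvRoot p a :=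
      ((hiff12 _ _).mpr (pvRt_of_fix (pvRt_root hG ha).2)).2
    have hfb2 : pvP (pvFind p.length (pvFind p.length p a).1 b).1 (pvRoot p b) = pvRoot p b :=
      ((hiff12 _ _).mpr (pvRt_of_fix (pvRt_root hG hb).2)).2
    have hralt : pvRoot p a < (pvFind p.length (pvFind p.length p a).1 b).1.length := by
      rw [hl2']; exact pvRoot_lt hG ha
    have hrblt : pvRoot p b < (pvFind p.length (pvFind p.length p a).1 b).1.length := by
      rw [hl2']; exact pvRoot_lt hG hb
    have hGq' := pvLink_good hG2 hfa2 hfb2 hrr hralt hrblt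
    refine ⟨?_, hGq', ?_⟩
    · rw [List.length_set, hl2']
    · intro y hy
      have hylen' :
          y < ((pvFind p.length (pvFind p.length p a).1 b).1.set (pvRoot p b) (pvRoot p a)).length := by
        rw [List.length_set, hl2']; exact hy
      by_cases hyb : pvRoot p y = pvRoot p b
      · have hRt : pvRt (pvFind p.length (pvFind p.length p a).1 b).1 y (pvRoot p b) :=
          (hiff12 y _).mpr (hyb ▸ pvRt_root hG hy)
        obtain ⟨⟨d, hd⟩, _⟩ := hRt
        have hlink := pvLink_Rt_b hfa2 hrr hrblt d y hd
        rw [pvRoot_eq hGq' hylen' hlink]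
        unfold pvSub
        rw [if_pos hyb]
      · have hRt : pvRt (pvFind p.length (pvFind p.length p a).1 b).1 y (pvRoot p y) :=
          (hiff12 y _).mpr (pvRt_root hG hy)
        have hlink := pvLink_Rt_other (ra := pvRoot p a) hfb2 hRt hyb
        rw [pvRoot_eq hGq' hylen' hlink]
        unfold pvSub
        rw [if_neg hyb]

-- the invariant tying A's parent forest to B's label list
def pvInv (n : Nat) (p labels : List Nat) : Prop :=
  p.length = n ∧ labels.length = n ∧ pvGood p ∧
  ∀ x y, x < n → y < n → (pvRoot p x = pvRoot p y ↔ labels.getD x 0 = labels.getD y 0)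

theorem pvSub_iff {ra rb Rx Ry li lo Lx Ly : Nat}
    (hx_b : Rx = rb ↔ Lx = lo) (hy_b : Ry = rb ↔ Ly = lo)
    (hx_a : Rx = ra ↔ Lx = li) (hy_a : Ry = ra ↔ Ly = li)
    (hxy : Rx = Ry ↔ Lx = Ly) :
    (pvSub ra rb Rx = pvSub ra rb Ry ↔ pvSub li lo Lx = pvSub li lo Ly) := by
  unfold pvSub
  by_cases h1 : Rx = rb
  · rw [if_pos h1, if_pos (hx_b.mp h1)]
    by_cases h2 : Ry = rb
    · rw [if_pos h2, if_pos (hy_b.mp h2)]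
      simp
    · rw [if_neg h2, if_neg (fun h => h2 (hy_b.mpr h))]
      constructor
      · intro h; exact (hy_a.mp h.symm).symm
      · intro h; exact (hy_a.mpr h.symm).symm
  · rw [if_neg h1, if_neg (fun h => h1 (hx_b.mpr h))]
    by_cases h2 : Ry = rb
    · rw [if_pos h2, if_pos (hy_b.mp h2)]
      exact hx_a
    · rw [if_neg h2, if_neg (fun h => h2 (hy_b.mpr h))]
      exact hxy

theorem pvStep {n : Nat} {p labels : List Nat} (hInv : pvInv n p labels) {i j : Nat}
    (hi : i < n) (hj : j < n) :
    pvInv n (pvUnion n p i j)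
      (if labels.getD j 0 ≠ labels.getD i 0 then
        labels.map (fun l => if l = labels.getD j 0 then labels.getD i 0 else l)
      else labels) := by
  obtain ⟨hpl, hll, hG, hrel⟩ := hInv
  subst hpl
  obtain ⟨hUl, hUG, hUroot⟩ := pvUnion_spec hG hi hj
  have hkey : (pvRoot p i = pvRoot p j) ↔ (labels.getD i 0 = labels.getD j 0) :=
    hrel i j hi hj
  refine ⟨hUl, ?_, hUG, ?_⟩
  · split_ifs with h
    · rw [List.length_map]; exact hll
    · exact hll
  · intro x y hx hy
    rw [hUroot x hx, hUroot y hy]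
    by_cases hc : labels.getD j 0 ≠ labels.getD i 0
    · rw [if_pos hc]
      have hmap : ∀ z, z < p.length →
          (labels.map (fun l => if l = labels.getD j 0 then labels.getD i 0 else l)).getD z 0 =
            pvSub (labels.getD i 0) (labels.getD j 0) (labels.getD z 0) := by
        intro z hz
        have hzl : z < labels.length := by rw [hll]; exact hz
        simp only [pvSub, List.getD_eq_getElem?_getD, List.getElem?_map,
          List.getElem?_eq_getElem hzl, Option.map_some, Option.getD_some]
      rw [hmap x hx, hmap y hy]
      exact pvSub_iff (hrel x j hx hj) (hrel y j hy hj) (hrel x i hx hi) (hrel y i hy hi)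
        (hrel x y hx hy)
    · rw [if_neg hc]
      have hlol : labels.getD j 0 = labels.getD i 0 := not_not.mp hc
      have hrr : pvRoot p i = pvRoot p j := hkey.mpr hlol.symm
      have hsub : ∀ v, pvSub (pvRoot p i) (pvRoot p j) v = v := by
        intro v
        unfold pvSub
        split_ifs with h
        · rw [hrr, h]
        · rfl
      rw [hsub, hsub]
      exact hrel x y hx hy

theorem pvFold2 {α β γ : Type} (l : List γ) (fA : α → γ → α) (fB : β → γ → β)
    (P : α → β → Prop) (h : ∀ a b x, x ∈ l → P a b → P (fA a x) (fB b x)) :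
    ∀ {a : α} {b : β}, P a b → P (l.foldl fA a) (l.foldl fB b) := by
  induction l with
  | nil => intro a b hp; exact hp
  | cons x l ih =>
      intro a b hp
      exact ih (fun a b y hy => h a b y (List.mem_cons_of_mem _ hy))
        (h a b x List.mem_cons_self hp)

theorem pvInv_init (n : Nat) : pvInv n (List.range n) (List.range n) := by
  have hP : ∀ x, pvP (List.range n) x = x := by
    intro x
    unfold pvP
    rcases Nat.lt_or_ge x n with h | h
    · rw [List.getD_eq_getElem?_getD, List.getElem?_range h]
      rfl
    · rw [List.getD_eq_getElem?_getD, List.getElem?_eq_none (by simpa using h)]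
      rfl
  have hg : ∀ z, z < n → (List.range n).getD z 0 = z := by
    intro z hz
    rw [List.getD_eq_getElem?_getD, List.getElem?_range hz]
    rfl
  refine ⟨List.length_range, List.length_range, ⟨?_, ⟨id, ?_⟩⟩, ?_⟩
  · intro x hx
    rw [hP]
    exact hx
  · intro x hx hne
    exact absurd (hP x) hne
  · intro x y hx hy
    have hr : ∀ z, z < n → pvRoot (List.range n) z = z := by
      intro z hz
      show pvIter (List.range n) (List.range n).length z = z
      exact pvIter_fix _ (hP z) _
    rw [hr x hx, hr y hy, hg x hx, hg y hy]

-- the distinct-count of two pointwise-equivalent labelings agree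
theorem pvCount_eq {l : List Nat} {f g : Nat → Nat}
    (h : ∀ x ∈ l, ∀ y ∈ l, f x = f y ↔ g x = g y) :
    (PySem.Set.ofList (l.map f)).length = (PySem.Set.ofList (l.map g)).length := by
  induction l using List.reverseRecOn with
  | nil => rfl
  | append_singleton l a ih =>
      rw [List.map_append, List.map_append, List.map_singleton, List.map_singleton,
        PySem.Set.ofList_append_singleton, PySem.Set.ofList_append_singleton]
      have hsub : ∀ x ∈ l, ∀ y ∈ l, f x = f y ↔ g x = g y := fun x hx y hy =>
        h x (by simp [hx]) y (by simp [hy])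
      have hmem : f a ∈ PySem.Set.ofList (l.map f) ↔ g a ∈ PySem.Set.ofList (l.map g) := by
        rw [PySem.Set.mem_ofList, PySem.Set.mem_ofList]
        simp only [List.mem_map]
        constructor
        · rintro ⟨x, hx, hfx⟩; exact ⟨x, hx, (h x (by simp [hx]) a (by simp)).mp hfx⟩
        · rintro ⟨x, hx, hgx⟩; exact ⟨x, hx, (h x (by simp [hx]) a (by simp)).mpr hgx⟩
      by_cases hm : f a ∈ PySem.Set.ofList (l.map f)
      · have c1 : (PySem.Set.ofList (l.map f)).contains (f a) = true :=
          (PySem.Set.contains_iff _ _).mpr hm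
        have c2 : (PySem.Set.ofList (l.map g)).contains (g a) = true :=
          (PySem.Set.contains_iff _ _).mpr (hmem.mp hm)
        simp only [PySem.Set.add, c1, c2, if_pos]
        exact ih hsub
      · have c1 : ¬ ((PySem.Set.ofList (l.map f)).contains (f a) = true) :=
          fun h' => hm ((PySem.Set.contains_iff _ _).mp h')
        have c2 : ¬ ((PySem.Set.ofList (l.map g)).contains (g a) = true) :=
          fun h' => (fun hmm => hm (hmem.mpr hmm)) ((PySem.Set.contains_iff _ _).mp h')
        simp only [PySem.Set.add, c1, c2, if_false, Bool.false_eq_true]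
        simp [List.length_append, ih hsub]

theorem pvMapGetD {l : List Nat} {n : Nat} (h : l.length = n) :
    (List.range n).map (fun x => l.getD x 0) = l := by
  subst h
  apply List.ext_getElem
  · simp
  · intro i h1 h2
    simp [List.getElem?_eq_getElem h2]

-- A's final pass returns the set of roots, and compression keeps roots unchanged
theorem pvFinalA {n : Nat} {p : List Nat} (hpn : p.length = n) (hG : pvGood p) :
    ∀ (l : List Nat) (q : List Nat) (s : PySem.Set Nat), q.length = n → pvGood q →
      (∀ y r0, pvRt q y r0 ↔ pvRt p y r0) → (∀ x ∈ l, x < n) →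
      (l.foldl (fun st x =>
        let t := pvFind n st.1 x
        (t.1, PySem.Set.add st.2 t.2)) (q, s)).2
        = PySem.Set.update s (l.map (pvRoot p)) := by
  intro l
  induction l with
  | nil =>
      intro q s _ _ _ _
      rw [List.foldl_nil, List.map_nil, PySem.Set.update_nil]
  | cons x l ih =>
      intro q s hlen hGq hiff hmem
      have hxn : x < n := hmem x List.mem_cons_self
      have hx : x < q.length := by rw [hlen]; exact hxn
      have hfull := pvFind_full hGq hx
      rw [hlen] at hfull
      obtain ⟨ht2, htlen, htG, htiff⟩ := hfull
      have hxp : x < p.length := by rw [hpn]; exact hxn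
      have hrootq : pvRoot q x = pvRoot p x :=
        pvRoot_eq hGq hx ((hiff x _).mpr (pvRt_root hG hxp))
      rw [List.foldl_cons]
      rw [ih (pvFind n q x).1 _ htlen htG (fun y r0 => (htiff y r0).trans (hiff y r0))
        (fun y hy => hmem y (List.mem_cons_of_mem _ hy))]
      rw [ht2, hrootq, List.map_cons, PySem.Set.update_cons]

theorem pvMain (points : List (Int × Int)) (k : Int) : solve points k = solve_alt points k := by
  simp only [solve, solve_alt]
  set P1 := (List.range points.length).foldl (fun p i =>
    (List.range i).foldl (fun p j =>
      if pvDistSq (points.getD i (0,0)) (points.getD j (0,0)) ≤ k^2 then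
        pvUnion points.length p i j
      else p) p) (List.range points.length) with hP1def
  set L1 := (List.range points.length).foldl (fun labels i =>
    (List.range i).foldl (fun labels j =>
      if ((points.getD i (0,0)).1 - (points.getD j (0,0)).1)^2 +
          ((points.getD i (0,0)).2 - (points.getD j (0,0)).2)^2 ≤ k*k then
        if labels.getD j 0 ≠ labels.getD i 0 then
          labels.map (fun l => if l = labels.getD j 0 then labels.getD i 0 else l)
        else labels
      else labels) labels) (List.range points.length) with hL1def
  have hmain : pvInv points.length P1 L1 := by
    rw [hP1def, hL1def]
    apply pvFold2 _ _ _ (pvInv points.length) ?_ (pvInv_init points.length)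
    intro p labels i hi hP
    have hi' : i < points.length := List.mem_range.mp hi
    apply pvFold2 _ _ _ (pvInv points.length) ?_ hP
    intro p' labels' j hj hP'
    have hj' : j < points.length := lt_trans (List.mem_range.mp hj) hi'
    have he1 : ((points.getD i (0,0)).1 - (points.getD j (0,0)).1)^2 +
        ((points.getD i (0,0)).2 - (points.getD j (0,0)).2)^2 =
        pvDistSq (points.getD i (0,0)) (points.getD j (0,0)) := by
      unfold pvDistSq; ring
    have he2 : k * k = k ^ 2 := (pow_two k).symm
    rw [he1, he2]
    by_cases hA : pvDistSq (points.getD i (0,0)) (points.getD j (0,0)) ≤ k^2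
    · rw [if_pos hA, if_pos hA]
      exact pvStep hP' hi' hj'
    · rw [if_neg hA, if_neg hA]
      exact hP'
  obtain ⟨hP1len, hL1len, hG1, hrel1⟩ := hmain
  rw [pvFinalA hP1len hG1 (List.range points.length) P1 (PySem.Set.ofList ([] : List Nat))
    hP1len hG1 (fun _ _ => Iff.rfl) (fun x hx => List.mem_range.mp hx)]
  rw [show PySem.Set.ofList ([] : List Nat) = ([] : PySem.Set Nat) from rfl,
    PySem.Set.update_nil_left]
  conv_rhs => rw [← pvMapGetD hL1len]
  unfold PySem.Set.len
  exact congrArg _ (pvCount_eq (fun x hx y hy =>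
    hrel1 x y (List.mem_range.mp hx) (List.mem_range.mp hy)))

-- ===== VERDICT (by name: the statement is the Claim_ definition above) =====
theorem solve_spec : Claim_equal_solve := by
  intro points k _
  unfold Spec_solve
  exact pvMain points k
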